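-- pv_equiv track=rewrite | github.com/PR713/university-courses | algorithms-and-data-structures/WDI/97.trzy_podzbiory_liczba_jedynek.py | zad28
-- ===== SOURCE A (Python) =====
-- def bin(x):
--     jedynki = 0
--     while x > 0:
--         if x % 2 == 1:
--             jedynki += 1
--         x //= 2
--     return jedynki
--
-- def zad28(T,org=1,ile1=0,ile2=0,ile3=0,indeks=0):
--     n = len(T)
--     if org:
--         org = 0
--         for i in range(n):
--             T[i] = bin(T[i])
--
--     if indeks == n:
--         return True if ile1 == ile2 == ile3 else False
--
--     return zad28(T,0,ile1+T[indeks],ile2,ile3,indeks+1) or\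
--            zad28(T,0,ile1,ile2+T[indeks],ile3,indeks+1) or\
--            zad28(T,0,ile1,ile2,ile3+T[indeks],indeks+1)
-- ===== SOURCE B (Python) =====
-- def zad28(T, org=1, ile1=0, ile2=0, ile3=0, indeks=0):
--     n = len(T)
--     if org:
--         # convert in place, as the original does
--         T[:] = [x.bit_count() if x > 0 else 0 for x in T]
--     rest = [T[i] for i in range(indeks, n)]
--     total = ile1 + ile2 + ile3 + sum(rest)
--     pairs = {(ile1, ile2)}
--     for v in rest:
--         pairs = {q for a, b in pairs for q in ((a + v, b), (a, b + v), (a, b))}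
--     return any(a == b == total - a - b for (a, b) in pairs)
-- ===== Notes on version B (the rewrite author's own statement) =====
-- stated objective: faster
-- what changed: Replaces A's exponential three-way branching recursion with an iterative dynamic program over the set of reachable (sum1, sum2) pairs, checking the equal-split condition against the total at the end.
import Mathlib
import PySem

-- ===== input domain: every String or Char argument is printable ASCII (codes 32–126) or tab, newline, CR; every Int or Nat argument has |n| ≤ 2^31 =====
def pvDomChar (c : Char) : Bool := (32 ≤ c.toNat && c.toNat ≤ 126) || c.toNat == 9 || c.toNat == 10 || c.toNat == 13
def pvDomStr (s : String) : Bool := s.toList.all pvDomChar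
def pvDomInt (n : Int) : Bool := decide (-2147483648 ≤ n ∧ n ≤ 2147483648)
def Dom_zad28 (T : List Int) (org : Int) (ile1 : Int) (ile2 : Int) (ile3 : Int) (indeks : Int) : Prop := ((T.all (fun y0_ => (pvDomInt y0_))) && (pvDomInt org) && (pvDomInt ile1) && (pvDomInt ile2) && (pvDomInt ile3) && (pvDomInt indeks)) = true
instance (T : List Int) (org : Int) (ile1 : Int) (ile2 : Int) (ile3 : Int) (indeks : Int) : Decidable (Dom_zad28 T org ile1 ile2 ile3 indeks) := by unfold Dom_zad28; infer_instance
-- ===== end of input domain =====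

-- B replaces A's exponential three-way recursion by an iterative DP over the set of reachable (sum1, sum2)
-- pairs; intended as faster (timing: 1.82x at the largest size both finished; A timed out at n=64
-- where B returned). A mutates T in place when org is truthy; B performs the same mutation; the
-- equivalence proved here is about the return value.

-- ===== PORT A =====
-- helper bin(x): count of 1 bits of x (0 for x ≤ 0), transliterated from A's while-loop
def binA (x : Int) : Int :=
  if 0 < x then
    (if PySem.Int.mod x 2 = 1 then 1 else 0) + binA (PySem.Int.floordiv x 2)
  else 0
termination_by x.toNat
decreasing_by
  rename_i h
  rw [PySem.Int.floordiv_eq_ediv_of_pos (by omega : (0:Int) < 2)]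
  omega

-- the recursion of zad28 after the one-time org conversion (all recursive calls have org = 0)
def zad28Go (T : List Int) (ile1 ile2 ile3 indeks : Int) : Bool :=
  if indeks = (T.length : Int) then decide (ile1 = ile2 ∧ ile2 = ile3)
  else
    match h : PySem.List.pyGet? T indeks with
    | none => false            -- Python raises IndexError here; excluded by Pre_
    | some v =>
        zad28Go T (ile1 + v) ile2 ile3 (indeks + 1) ||
        zad28Go T ile1 (ile2 + v) ile3 (indeks + 1) ||
        zad28Go T ile1 ile2 (ile3 + v) (indeks + 1)
termination_by ((T.length : Int) - indeks).toNat
decreasing_by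
  all_goals
    have hin : PySem.Raise.InRange T.length indeks := by
      by_contra hc
      rw [← PySem.List.pyGet?_eq_none_iff, h] at hc
      simp at hc
    simp [PySem.Raise.InRange] at hin
    omega

def zad28 (T : List Int) (org : Int) (ile1 : Int) (ile2 : Int) (ile3 : Int) (indeks : Int) : Bool :=
  if org ≠ 0 then zad28Go (T.map binA) ile1 ile2 ile3 indeks
  else zad28Go T ile1 ile2 ile3 indeks

-- ===== PORT B =====
-- B's popcount: x.bit_count() if x > 0 else 0
def pcnt (x : Int) : Int := if 0 < x then (PySem.Int.bitCount x : Int) else 0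

-- one DP step: from the set of reachable (sum1, sum2) pairs, the set after assigning v to pile 1, 2 or 3
def dpStep (v : Int) (ps : List (Int × Int)) : List (Int × Int) :=
  PySem.Set.ofList (ps.flatMap (fun p => [(p.1 + v, p.2), (p.1, p.2 + v), p]))

def zad28_alt (T : List Int) (org : Int) (ile1 : Int) (ile2 : Int) (ile3 : Int) (indeks : Int) : Bool :=
  let n : Int := T.length
  let T' := if org ≠ 0 then T.map pcnt else T
  let rest := (PySem.List.pyRange indeks n 1).map (fun i => PySem.List.pyGetD T' i 0)
  let total := ile1 + ile2 + ile3 + rest.sum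
  let pairs := rest.foldl (fun ps v => dpStep v ps) (PySem.Set.ofList [(ile1, ile2)])
  pairs.any (fun p => decide (p.1 = p.2) && decide (p.2 = total - p.1 - p.2))

-- ===== PRECONDITION & SPEC =====
-- Pre_ excludes exactly the inputs on which A raises IndexError: indeks outside [-len(T), len(T)]
def Pre_zad28 (T : List Int) (org : Int) (ile1 : Int) (ile2 : Int) (ile3 : Int) (indeks : Int) : Prop :=
  -(T.length : Int) ≤ indeks ∧ indeks ≤ (T.length : Int)
instance (T : List Int) (org : Int) (ile1 : Int) (ile2 : Int) (ile3 : Int) (indeks : Int) : Decidable (Pre_zad28 T org ile1 ile2 ile3 indeks) := by unfold Pre_zad28; infer_instance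

def pvWitness_zad28 : List Int × Int × Int × Int × Int × Int := ([3, 5, 6], 1, 0, 0, 0, 0)

def Spec_zad28 (T : List Int) (org : Int) (ile1 : Int) (ile2 : Int) (ile3 : Int) (indeks : Int) (out : Bool) : Prop := out = zad28_alt T org ile1 ile2 ile3 indeks
instance (T : List Int) (org : Int) (ile1 : Int) (ile2 : Int) (ile3 : Int) (indeks : Int) (out : Bool) : Decidable (Spec_zad28 T org ile1 ile2 ile3 indeks out) := by unfold Spec_zad28; infer_instance

-- ===== CLAIM (what is proved, stated in full; the proofs are below) =====
def Claim_equal_zad28 : Prop := ∀ (T : List Int) (org : Int) (ile1 : Int) (ile2 : Int) (ile3 : Int) (indeks : Int), Dom_zad28 T org ile1 ile2 ile3 indeks → Pre_zad28 T org ile1 ile2 ile3 indeks → Spec_zad28 T org ile1 ile2 ile3 indeks (zad28 T org ile1 ile2 ile3 indeks)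

-- ===== LEMMAS AND PROOFS =====

-- A's bin is B's popcount
theorem binA_eq (x : Int) : binA x = pcnt x := by
  rw [pcnt]
  induction hk : x.toNat using Nat.strong_induction_on generalizing x with
  | _ k ih =>
    rw [binA]
    by_cases hx : 0 < x
    · rw [if_pos hx, if_pos hx, PySem.Int.bitCount_of_pos hx]
      have h2 : (0:Int) < 2 := by omega
      have hm : PySem.Int.mod x 2 = x % 2 := PySem.Int.mod_eq_emod_of_pos h2
      have hd : PySem.Int.floordiv x 2 = x / 2 := PySem.Int.floordiv_eq_ediv_of_pos h2
      have hrec := ih (x / 2).toNat (by omega) (x / 2) rfl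
      rw [hd] at *
      by_cases hpos : 0 < x / 2
      · rw [if_pos hpos] at hrec
        rw [hrec, hm]
        push_cast
        omega
      · have hz : x / 2 = 0 := by omega
        rw [if_neg hpos] at hrec
        rw [hrec, hm, hz]
        simp [PySem.Int.bitCount_zero]
        omega
    · rw [if_neg hx, if_neg hx]

-- the pure structural recursion of A over the list of remaining values
def goList : List Int → Int → Int → Int → Bool
  | [], a, b, c => decide (a = b ∧ b = c)
  | v :: L, a, b, c => goList L (a + v) b c || goList L a (b + v) c || goList L a b (c + v)

-- the DP of B as a function of the remaining values and a start set
def dp (L : List Int) (s : List (Int × Int)) : List (Int × Int) :=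
  L.foldl (fun ps v => dpStep v ps) s

theorem mem_dpStep (v : Int) (s : List (Int × Int)) (q : Int × Int) :
    q ∈ dpStep v s ↔ ∃ p ∈ s, q = (p.1 + v, p.2) ∨ q = (p.1, p.2 + v) ∨ q = p := by
  simp [dpStep, PySem.Set.mem_ofList, List.mem_flatMap]

theorem mem_dp (L : List Int) (s : List (Int × Int)) (q : Int × Int) :
    q ∈ dp L s ↔ ∃ p ∈ s, q ∈ dp L [p] := by
  induction L generalizing s with
  | nil => simp [dp]
  | cons v L ih =>
    show q ∈ dp L (dpStep v s) ↔ ∃ p ∈ s, q ∈ dp L (dpStep v [p])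
    rw [ih]
    constructor
    · rintro ⟨p', hp', hq⟩
      rw [mem_dpStep] at hp'
      obtain ⟨p, hp, hcase⟩ := hp'
      refine ⟨p, hp, (ih (dpStep v [p])).mpr ⟨p', ?_, hq⟩⟩
      rw [mem_dpStep]
      exact ⟨p, List.mem_singleton_self p, hcase⟩
    · rintro ⟨p, hp, hq⟩
      rw [ih] at hq
      obtain ⟨p', hp', hq⟩ := hq
      rw [mem_dpStep] at hp'
      obtain ⟨p₀, hp₀, hcase⟩ := hp'
      simp at hp₀
      refine ⟨p', ?_, hq⟩
      rw [mem_dpStep]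
      have hps : p₀ ∈ s := by rw [hp₀]; exact hp
      exact ⟨p₀, hps, hcase⟩

theorem goList_iff (L : List Int) (a b c : Int) :
    goList L a b c = true ↔
      ∃ p ∈ dp L [(a, b)], p.1 = p.2 ∧ p.2 = (a + b + c + L.sum) - p.1 - p.2 := by
  induction L generalizing a b c with
  | nil =>
    simp only [goList, dp, List.foldl_nil, List.mem_singleton, decide_eq_true_eq, List.sum_nil]
    constructor
    · intro hh; exact ⟨(a, b), rfl, hh.1, by omega⟩
    · intro hh; obtain ⟨p, hp, h1, h2⟩ := hh; subst hp; constructor <;> omega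
  | cons v L ih =>
    have key : ∀ q, q ∈ dp (v :: L) [(a, b)] ↔
        q ∈ dp L [(a + v, b)] ∨ q ∈ dp L [(a, b + v)] ∨ q ∈ dp L [(a, b)] := by
      intro q
      show q ∈ dp L (dpStep v [(a, b)]) ↔ _
      rw [mem_dp]
      constructor
      · rintro ⟨p, hp, hq⟩
        rw [mem_dpStep] at hp
        obtain ⟨p₀, hp₀, hcase⟩ := hp
        simp at hp₀
        subst hp₀
        rcases hcase with rfl | rfl | rfl
        · exact Or.inl hq
        · exact Or.inr (Or.inl hq)
        · exact Or.inr (Or.inr hq)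
      · rintro (hq | hq | hq)
        · exact ⟨(a + v, b), by rw [mem_dpStep]; exact ⟨(a, b), by simp, by simp⟩, hq⟩
        · exact ⟨(a, b + v), by rw [mem_dpStep]; exact ⟨(a, b), by simp, by simp⟩, hq⟩
        · exact ⟨(a, b), by rw [mem_dpStep]; exact ⟨(a, b), by simp, by simp⟩, hq⟩
    simp only [goList, Bool.or_eq_true, ih, List.sum_cons]
    constructor
    · intro h
      rcases h with (h | h) | h
      · obtain ⟨p, hp, h1, h2⟩ := h
        exact ⟨p, (key p).mpr (Or.inl hp), h1, by omega⟩
      · obtain ⟨p, hp, h1, h2⟩ := h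
        exact ⟨p, (key p).mpr (Or.inr (Or.inl hp)), h1, by omega⟩
      · obtain ⟨p, hp, h1, h2⟩ := h
        exact ⟨p, (key p).mpr (Or.inr (Or.inr hp)), h1, by omega⟩
    · intro hh
      obtain ⟨p, hp, h1, h2⟩ := hh
      rcases (key p).mp hp with h | h | h
      · exact Or.inl (Or.inl ⟨p, h, h1, by omega⟩)
      · exact Or.inl (Or.inr ⟨p, h, h1, by omega⟩)
      · exact Or.inr ⟨p, h, h1, by omega⟩

-- A's indexed recursion equals goList over the values it visits
theorem go_eq (L : List Int) :
    ∀ (k : Nat) (a b c i : Int), -(L.length : Int) ≤ i → i ≤ (L.length : Int) →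
      ((L.length : Int) - i).toNat = k →
      zad28Go L a b c i =
        goList ((PySem.List.pyRange i (L.length : Int) 1).map (fun j => PySem.List.pyGetD L j 0)) a b c := by
  intro k
  induction k with
  | zero =>
    intro a b c i h1 h2 hk
    have hi : i = (L.length : Int) := by omega
    rw [zad28Go, if_pos hi, hi, PySem.List.pyRange_one_eq_nil (by omega)]
    simp [goList]
  | succ k ih =>
    intro a b c i h1 h2 hk
    have hlt : i < (L.length : Int) := by omega
    have hv : PySem.List.pyGet? L i = some (PySem.List.pyGetD L i 0) := by
      have hn : PySem.List.pyGet? L i ≠ none := by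
        intro hc
        rw [PySem.List.pyGet?_eq_none_iff] at hc
        simp [PySem.Raise.InRange] at hc
        omega
      cases hg : PySem.List.pyGet? L i with
      | none => exact absurd hg hn
      | some v =>
        have : PySem.List.pyGetD L i 0 = (PySem.List.pyGet? L i).getD 0 := rfl
        rw [this, hg]
        rfl
    rw [zad28Go, if_neg (by omega), hv]
    dsimp only
    rw [PySem.List.pyRange_one_cons hlt, List.map_cons, goList,
      ih _ _ _ _ (by omega) (by omega) (by omega),
      ih _ _ _ _ (by omega) (by omega) (by omega),
      ih _ _ _ _ (by omega) (by omega) (by omega)]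

-- singleton set literal
theorem ofList_singleton (p : Int × Int) : PySem.Set.ofList [p] = [p] := rfl

theorem main_eq (L : List Int) (a b c i : Int)
    (h1 : -(L.length : Int) ≤ i) (h2 : i ≤ (L.length : Int)) :
    zad28Go L a b c i =
      (let rest := (PySem.List.pyRange i (L.length : Int) 1).map (fun j => PySem.List.pyGetD L j 0)
       let total := a + b + c + rest.sum
       (rest.foldl (fun ps v => dpStep v ps) (PySem.Set.ofList [(a, b)])).any
         (fun p => decide (p.1 = p.2) && decide (p.2 = total - p.1 - p.2))) := by
  simp only []
  rw [go_eq L (((L.length : Int) - i).toNat) a b c i h1 h2 rfl, ofList_singleton]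
  rw [Bool.eq_iff_iff, goList_iff]
  rw [List.any_eq_true]
  constructor
  · rintro ⟨p, hp, hh1, hh2⟩
    refine ⟨p, hp, ?_⟩
    simp only [Bool.and_eq_true, decide_eq_true_eq]
    exact ⟨hh1, hh2⟩
  · rintro ⟨p, hp, hf⟩
    simp at hf
    exact ⟨p, hp, hf.1, hf.2⟩

-- ===== VERDICT (by name: the statement is the Claim_ definition above) =====
theorem zad28_spec : Claim_equal_zad28 := by
  intro T org ile1 ile2 ile3 indeks _ hpre
  unfold Spec_zad28 zad28 zad28_alt
  obtain ⟨h1, h2⟩ := hpre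
  have hmap : T.map binA = T.map pcnt := List.map_congr_left (fun x _ => binA_eq x)
  by_cases horg : org ≠ 0
  · simp only [if_pos horg, hmap]
    have hlen : ((T.map pcnt).length : Int) = (T.length : Int) := by simp
    rw [main_eq (T.map pcnt) ile1 ile2 ile3 indeks (by omega) (by omega), hlen]
  · simp only [if_neg horg]
    exact main_eq T ile1 ile2 ile3 indeks h1 h2
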